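-- pv_equiv track=rewrite | github.com/PaulisMatrix/DSA | misc/temp.py | solution
-- ===== SOURCE A (Python) =====
-- def solution(score):
--     sorted_scores = sorted(score,reverse=True)
--     mydict = {num:idx for idx,num in enumerate(sorted_scores,start=1)}
--     medals = {1:"Gold",2:"Silver",3:"Bronze"}
--
--     result = []
--     for nums in score:
--         result.append(medals.get(mydict[nums],str(mydict[nums])))
--     return result
-- ===== SOURCE B (Python) =====
-- def solution(score):
--     medals = {1: "Gold", 2: "Silver", 3: "Bronze"}
--     counts = {}
--     for s in score:
--         counts[s] = counts.get(s, 0) + 1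
--     rank = {}
--     n_less = 0
--     for v in sorted(counts):
--         rank[v] = len(score) - n_less
--         n_less += counts[v]
--     return [medals.get(rank[x], str(rank[x])) for x in score]
-- ===== Notes on version B (the rewrite author's own statement) =====
-- stated objective: alternative
-- what changed: Replaces A's sort-position rank dict (rank overwritten to the last sorted position per value) by an occurrence counter plus one ascending pass of cumulative counts assigning each distinct value the rank n - (#smaller).
import Mathlib
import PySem

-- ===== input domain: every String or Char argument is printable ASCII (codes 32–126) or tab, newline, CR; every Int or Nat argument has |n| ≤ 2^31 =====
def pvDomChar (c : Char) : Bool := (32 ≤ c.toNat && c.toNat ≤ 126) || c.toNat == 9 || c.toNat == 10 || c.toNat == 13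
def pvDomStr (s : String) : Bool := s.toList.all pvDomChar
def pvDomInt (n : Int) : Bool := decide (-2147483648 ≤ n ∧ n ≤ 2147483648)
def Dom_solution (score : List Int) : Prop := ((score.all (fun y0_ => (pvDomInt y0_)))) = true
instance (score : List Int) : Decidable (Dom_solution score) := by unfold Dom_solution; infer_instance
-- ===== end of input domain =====

-- B drops the sort-position rank dict: it counts occurrences, then assigns each distinct value the
-- rank n - (#smaller) via one ascending pass of cumulative counts; objective: alternative (same cost).


-- ===== PORT A =====
-- mydict[nums] never raises (every element of score is a key of mydict), so the lookup is getD
-- with an unused default.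
def solution (score : List Int) : List String :=
  let sortedScores := PySem.List.sorted score (fun x => x) true
  let mydict : PySem.Dict Int Int :=
    (PySem.List.enumerate sortedScores 1).foldl (fun d p => d.insert p.2 p.1) PySem.Dict.empty
  let medals : PySem.Dict Int String :=
    PySem.Dict.ofList [(1, "Gold"), (2, "Silver"), (3, "Bronze")]
  score.foldl (fun result nums =>
    result ++ [medals.getD (mydict.getD nums 0) (PySem.Int.toStr (mydict.getD nums 0))]) []

-- ===== PORT B =====
-- rank[x] never raises (every element of score is a key of rank), so the lookup is getD with an
-- unused default; the (rank, n_less) loop state is a pair.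
def solution_alt (score : List Int) : List String :=
  let medals : PySem.Dict Int String :=
    PySem.Dict.ofList [(1, "Gold"), (2, "Silver"), (3, "Bronze")]
  let counts : PySem.Dict Int Int :=
    score.foldl (fun d s => d.insert s (d.getD s 0 + 1)) PySem.Dict.empty
  let st : PySem.Dict Int Int × Int :=
    (PySem.List.sorted counts.keys (fun x => x) false).foldl
      (fun p v => (p.1.insert v ((score.length : Int) - p.2), p.2 + counts.getD v 0))
      (PySem.Dict.empty, 0)
  score.map (fun x => medals.getD (st.1.getD x 0) (PySem.Int.toStr (st.1.getD x 0)))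

-- ===== PRECONDITION & SPEC =====
def Spec_solution (score : List Int) (out : List String) : Prop := out = solution_alt score
instance (score : List Int) (out : List String) : Decidable (Spec_solution score out) := by unfold Spec_solution; infer_instance

-- ===== CLAIM (what is proved, stated in full; the proofs are below) =====
def Claim_equal_solution : Prop := ∀ (score : List Int), Dom_solution score → Spec_solution score (solution score)

-- ===== LEMMAS AND PROOFS =====

-- A side: inserting pairs whose keys avoid x leaves get? x unchanged
theorem getD_foldl_insert_of_not_mem (l : List (Int × Int)) (d : PySem.Dict Int Int)
    (x : Int) (hx : ∀ p ∈ l, p.2 ≠ x) :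
    (l.foldl (fun d p => d.insert p.2 p.1) d).get? x = d.get? x := by
  induction l generalizing d with
  | nil => rfl
  | cons p t ih =>
      simp only [List.foldl_cons]
      rw [ih _ (fun q hq => hx q (List.mem_cons_of_mem _ hq)),
          PySem.Dict.get?_insert_of_ne _ _ (fun h => hx p (List.mem_cons_self) h.symm)]

-- A side: the dict built from enumerate(s, n) of a descending list maps x to
-- n - 1 + (count of elems ≥ x)
theorem get?_rankDict (s : List Int) (n : Int) (d : PySem.Dict Int Int) (x : Int)
    (hs : s.Pairwise (fun a b => b ≤ a)) (hx : x ∈ s) :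
    ((PySem.List.enumerate s n).foldl (fun d p => d.insert p.2 p.1) d).get? x
      = some (n - 1 + (s.countP (fun y => decide (x ≤ y)) : Int)) := by
  induction s generalizing n d with
  | nil => cases hx
  | cons a t ih =>
      rw [List.pairwise_cons] at hs
      rw [PySem.List.enumerate_cons]
      simp only [List.foldl_cons]
      by_cases hxt : x ∈ t
      · rw [ih (n + 1) _ hs.2 hxt]
        have hxa : x ≤ a := hs.1 x hxt
        rw [List.countP_cons]
        simp only [decide_eq_true_eq, hxa, if_true]
        congr 1
        push_cast
        ring
      · have hxa : x = a := by
          rcases List.mem_cons.mp hx with h | h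
          · exact h
          · exact absurd h hxt
        subst hxa
        rw [getD_foldl_insert_of_not_mem _ _ _ (by
          intro p hp hpx
          rw [PySem.List.mem_enumerate_iff] at hp
          obtain ⟨k, hk, rfl⟩ := hp
          exact hxt (hpx ▸ List.getElem_mem hk))]
        rw [PySem.Dict.get?_insert_self]
        have ht0 : t.countP (fun y => decide (x ≤ y)) = 0 := by
          rw [List.countP_eq_zero]
          intro y hy
          simp only [decide_eq_true_eq]
          intro hxy
          exact hxt ((le_antisymm (hs.1 y hy) hxy) ▸ hy)
        rw [List.countP_cons]
        simp [ht0]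

-- B side: the cumulative-rank fold leaves get? x unchanged when x is not among the keys
theorem get?_rankFold_of_not_mem (ds : List Int) (st : PySem.Dict Int Int × Int)
    (n : Int) (cnt : Int → Int) (x : Int) (hx : x ∉ ds) :
    ((ds.foldl (fun p v => (p.1.insert v (n - p.2), p.2 + cnt v)) st).1).get? x
      = st.1.get? x := by
  induction ds generalizing st with
  | nil => rfl
  | cons a t ih =>
      simp only [List.foldl_cons]
      rw [ih _ (fun h => hx (List.mem_cons_of_mem _ h)),
          PySem.Dict.get?_insert_of_ne _ _ (fun h => hx (by rw [h]; exact List.mem_cons_self))]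

-- B side: over a strictly increasing key list, the fold maps x to n - (t + Σ counts of keys < x)
theorem get?_rankFold (ds : List Int) (d : PySem.Dict Int Int) (t : Int)
    (n : Int) (cnt : Int → Int) (x : Int)
    (hds : ds.Pairwise (fun a b => a < b)) (hx : x ∈ ds) :
    ((ds.foldl (fun p v => (p.1.insert v (n - p.2), p.2 + cnt v)) (d, t)).1).get? x
      = some (n - (t + ((ds.filter (fun v => decide (v < x))).map cnt).sum)) := by
  induction ds generalizing d t with
  | nil => cases hx
  | cons a r ih =>
      rw [List.pairwise_cons] at hds
      simp only [List.foldl_cons]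
      by_cases hxr : x ∈ r
      · have hax : a < x := hds.1 x hxr
        rw [ih _ _ hds.2 hxr, List.filter_cons]
        simp only [decide_eq_true_eq, hax, if_true, List.map_cons, List.sum_cons]
        congr 1
        ring
      · have hxa : x = a := by
          rcases List.mem_cons.mp hx with h | h
          · exact h
          · exact absurd h hxr
        subst hxa
        rw [get?_rankFold_of_not_mem _ _ _ _ _ hxr, PySem.Dict.get?_insert_self]
        have hr0 : r.filter (fun v => decide (v < x)) = [] := by
          rw [List.filter_eq_nil_iff]
          intro y hy
          simp only [decide_eq_true_eq, not_lt]
          exact le_of_lt (hds.1 y hy)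
        rw [List.filter_cons]
        simp [hr0]

-- B side: summing the multiplicities of the distinct values below x counts the elements below x
theorem sum_counts_filter (score : List Int) (x : Int) :
    (((PySem.List.sorted (PySem.Set.ofList score) (fun x => x) false).filter
        (fun v => decide (v < x))).map (fun v => (score.count v : Int))).sum
      = (score.countP (fun v => decide (v < x)) : Int) := by
  have hperm : (PySem.List.sorted (PySem.Set.ofList score) (fun x => x) false).Perm score.dedup := by
    refine ((PySem.List.sorted_perm _ _ _).trans ?_)
    rw [List.perm_ext_iff_of_nodup (PySem.Set.nodup_ofList score) score.nodup_dedup]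
    intro a
    rw [PySem.Set.mem_ofList, List.mem_dedup]
  rw [((hperm.filter _).map _).sum_eq,
      ← List.sum_map_count_dedup_filter_eq_countP (fun v => decide (v < x)) score,
      Nat.cast_list_sum, List.map_map]
  simp [Function.comp_def]

-- counting below x and counting at-least x partition the list
theorem countP_lt_add_countP_ge (score : List Int) (x : Int) :
    score.countP (fun v => decide (v < x)) + score.countP (fun y => decide (x ≤ y))
      = score.length := by
  have h := List.length_eq_countP_add_countP (fun v => decide (v < x)) (l := score)
  have he : score.countP (fun a => decide ¬(decide (a < x) = true)) =
      score.countP (fun y => decide (x ≤ y)) :=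
    List.countP_congr (fun a _ => by simp [not_lt])
  rw [he] at h
  omega

theorem solution_eq_alt (score : List Int) : solution score = solution_alt score := by
  unfold solution solution_alt
  rw [PySem.List.foldl_append_singleton_eq_map]
  apply List.map_congr_left
  intro x hx
  -- A's rank for x
  have hA :
      (((PySem.List.enumerate (PySem.List.sorted score (fun x => x) true) 1).foldl
          (fun d p => d.insert p.2 p.1) PySem.Dict.empty).getD x 0)
        = (score.countP (fun y => decide (x ≤ y)) : Int) := by
    have hmem : x ∈ PySem.List.sorted score (fun x => x) true :=
      (PySem.List.mem_sorted score (fun x => x) true x).mpr hx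
    rw [PySem.Dict.getD_eq_get?_getD,
        get?_rankDict _ 1 _ x (PySem.List.sorted_pairwise_rev score (fun x => x)) hmem,
        (PySem.List.sorted_perm score (fun x => x) true).countP_eq]
    simp
  -- B's rank for x
  have hB :
      (((PySem.List.sorted
            (score.foldl (fun d s => d.insert s (d.getD s (0 : Int) + 1)) PySem.Dict.empty).keys
            (fun x => x) false).foldl
          (fun p v => (p.1.insert v ((score.length : Int) - p.2),
                        p.2 + (score.foldl (fun d s => d.insert s (d.getD s (0 : Int) + 1))
                                PySem.Dict.empty).getD v 0))
          (PySem.Dict.empty, 0)).1.getD x 0)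
        = (score.countP (fun y => decide (x ≤ y)) : Int) := by
    simp only [PySem.Dict.foldl_insert_getD_add_one_eq_counter, PySem.Dict.keys_counter]
    have hmem : x ∈ PySem.List.sorted (PySem.Set.ofList score) (fun x => x) false := by
      rw [PySem.List.mem_sorted, PySem.Set.mem_ofList]
      exact hx
    rw [PySem.Dict.getD_eq_get?_getD,
        get?_rankFold _ _ _ _ _ x (PySem.List.sorted_ofList_pairwise_lt score) hmem]
    simp only [Option.getD_some, zero_add, PySem.Dict.getD_counter]
    rw [sum_counts_filter]
    have := countP_lt_add_countP_ge score x
    omega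
  rw [hA, hB]

-- ===== VERDICT (by name: the statement is the Claim_ definition above) =====
theorem solution_spec : Claim_equal_solution := by
  intro score _
  unfold Spec_solution
  exact solution_eq_alt score
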